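-- pv_equiv track=rewrite | github.com/Xucranger/PLofLBFL | TraditionalFLForBugT&Condefects/MBFL/MBFL_debug.py | MUSEChange
-- ===== SOURCE A (Python) =====
-- def MUSEChange(cov,res,order,temp_cov,temp_res,temp_order):
--     f2p = 0
--     p2f = 0
--     for i in range(len(order)):
--         for j in range(len(temp_order)):
--             if order[i] == order[j]:
--                 if res[i] == False and temp_res == True:
--                     f2p+=1
--                 if res[i] == True and temp_res == False:
--                     p2f+=1
--     return (f2p,p2f)
-- ===== SOURCE B (Python) =====
-- def MUSEChange(cov, res, order, temp_cov, temp_res, temp_order):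
--     # Count occurrences of each value in the order[:len(temp_order)] prefix once,
--     # then a single pass over order sums the per-element match counts.
--     cnt = {}
--     for x in order[:len(temp_order)]:
--         cnt[x] = cnt.get(x, 0) + 1
--     f2p = 0
--     p2f = 0
--     for i, x in enumerate(order):
--         c = cnt.get(x, 0)
--         if c:
--             if temp_res and not res[i]:
--                 f2p += c
--             elif not temp_res and res[i]:
--                 p2f += c
--     return (f2p, p2f)
-- ===== Notes on version B (the rewrite author's own statement) =====
-- stated objective: faster
-- what changed: Replaced the nested i,j scan with a frequency dict built once over order[:len(temp_order)] and a single pass over order that adds each element's precomputed match count.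
import Mathlib
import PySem

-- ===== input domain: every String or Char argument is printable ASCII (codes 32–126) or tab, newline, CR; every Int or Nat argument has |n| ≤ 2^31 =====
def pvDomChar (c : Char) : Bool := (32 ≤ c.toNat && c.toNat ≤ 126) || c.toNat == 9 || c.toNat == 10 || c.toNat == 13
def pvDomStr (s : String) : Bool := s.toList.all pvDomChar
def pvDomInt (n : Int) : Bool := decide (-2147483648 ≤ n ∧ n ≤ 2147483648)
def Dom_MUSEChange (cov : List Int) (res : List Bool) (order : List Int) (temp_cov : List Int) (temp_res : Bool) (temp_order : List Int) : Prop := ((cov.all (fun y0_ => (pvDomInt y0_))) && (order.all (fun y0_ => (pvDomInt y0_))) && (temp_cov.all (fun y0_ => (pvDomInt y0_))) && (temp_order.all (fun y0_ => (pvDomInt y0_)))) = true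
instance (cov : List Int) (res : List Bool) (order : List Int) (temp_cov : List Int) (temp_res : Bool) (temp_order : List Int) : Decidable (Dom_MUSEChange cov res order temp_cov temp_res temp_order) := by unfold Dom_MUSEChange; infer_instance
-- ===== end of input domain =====

-- B replaces A's nested O(n*m) scan with a frequency dict over order[:len(temp_order)]
-- built once plus a single pass over order (objective: faster, asymptotic).


-- ===== PORT A =====
def MUSEChange (cov : List Int) (res : List Bool) (order : List Int) (temp_cov : List Int) (temp_res : Bool) (temp_order : List Int) : Int × Int :=
  (PySem.List.pyRange 0 order.length 1).foldl
    (fun s i =>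
      (PySem.List.pyRange 0 temp_order.length 1).foldl
        (fun s j =>
          if PySem.List.pyGetD order i 0 == PySem.List.pyGetD order j 0 then
            let ri := PySem.List.pyGetD res i false
            let s1 := if ri == false && temp_res == true then (s.1 + 1, s.2) else s
            if ri == true && temp_res == false then (s1.1, s1.2 + 1) else s1
          else s)
        s)
    ((0 : Int), (0 : Int))

-- ===== PORT B =====
def MUSEChange_alt (cov : List Int) (res : List Bool) (order : List Int) (temp_cov : List Int) (temp_res : Bool) (temp_order : List Int) : Int × Int :=
  let cnt : PySem.Dict Int Int :=
    (PySem.List.slice order none (some (temp_order.length : Int))).foldl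
      (fun d x => d.insert x (d.getD x 0 + 1)) PySem.Dict.empty
  (PySem.List.enumerate order 0).foldl
    (fun s ix =>
      let c := cnt.getD ix.2 0
      if c ≠ 0 then
        if temp_res && !(PySem.List.pyGetD res ix.1 false) then (s.1 + c, s.2)
        else if !temp_res && PySem.List.pyGetD res ix.1 false then (s.1, s.2 + c)
        else s
      else s)
    ((0 : Int), (0 : Int))

-- ===== PRECONDITION & SPEC =====
-- Exactly the inputs on which Python A returns (no IndexError): either order is empty
-- (no iteration), or temp_order is no longer than order (else order[j] raises) and every
-- order element at an index beyond len(res) has no match in order[:len(temp_order)]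
-- (else res[i] raises).
def Pre_MUSEChange (cov : List Int) (res : List Bool) (order : List Int) (temp_cov : List Int) (temp_res : Bool) (temp_order : List Int) : Prop :=
  order = [] ∨
    (temp_order.length ≤ order.length ∧
      ∀ x ∈ order.drop res.length, x ∉ order.take temp_order.length)
instance (cov : List Int) (res : List Bool) (order : List Int) (temp_cov : List Int) (temp_res : Bool) (temp_order : List Int) : Decidable (Pre_MUSEChange cov res order temp_cov temp_res temp_order) := by unfold Pre_MUSEChange; infer_instance

def pvWitness_MUSEChange : List Int × List Bool × List Int × List Int × Bool × List Int :=
  ([], [true, false], [5, 5, 3], [], true, [5, 3])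

def Spec_MUSEChange (cov : List Int) (res : List Bool) (order : List Int) (temp_cov : List Int) (temp_res : Bool) (temp_order : List Int) (out : Int × Int) : Prop := out = MUSEChange_alt cov res order temp_cov temp_res temp_order
instance (cov : List Int) (res : List Bool) (order : List Int) (temp_cov : List Int) (temp_res : Bool) (temp_order : List Int) (out : Int × Int) : Decidable (Spec_MUSEChange cov res order temp_cov temp_res temp_order out) := by unfold Spec_MUSEChange; infer_instance

-- ===== CLAIM (what is proved, stated in full; the proofs are below) =====
def Claim_equal_MUSEChange : Prop := ∀ (cov : List Int) (res : List Bool) (order : List Int) (temp_cov : List Int) (temp_res : Bool) (temp_order : List Int), Dom_MUSEChange cov res order temp_cov temp_res temp_order → Pre_MUSEChange cov res order temp_cov temp_res temp_order → Spec_MUSEChange cov res order temp_cov temp_res temp_order (MUSEChange cov res order temp_cov temp_res temp_order)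

-- ===== LEMMAS AND PROOFS =====

-- A's inner loop over the matched list: each match applies the two sequential ifs,
-- i.e. adds (a, b); count-many matches add (count*a, count*b).
theorem pv_innerA (l : List Int) (v : Int) (ri tr : Bool) (s : Int × Int) :
    l.foldl (fun s x =>
      if v == x then
        let s1 := if ri == false && tr == true then (s.1 + 1, s.2) else s
        if ri == true && tr == false then (s1.1, s1.2 + 1) else s1
      else s) s
    = (s.1 + (l.count v : Int) * (if ri == false && tr == true then 1 else 0),
       s.2 + (l.count v : Int) * (if ri == true && tr == false then 1 else 0)) := by
  induction l generalizing s with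
  | nil => simp
  | cons y t ih =>
    rw [List.foldl_cons]
    by_cases h : v = y
    · rw [if_pos (beq_iff_eq.mpr h), ih]
      have hcnt : (y :: t).count v = t.count v + 1 := by
        simp [h]
      rw [hcnt]
      cases ri <;> cases tr <;> simp [Prod.ext_iff] <;> ring
    · rw [if_neg (by simp [h]), ih]
      have hcnt : (y :: t).count v = t.count v := by
        simp [Ne.symm h]
      rw [hcnt]

-- ===== VERDICT (by name: the statement is the Claim_ definition above) =====
theorem MUSEChange_spec : Claim_equal_MUSEChange := by
  intro cov res order temp_cov temp_res temp_order _ hpre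
  unfold Spec_MUSEChange MUSEChange MUSEChange_alt
  rcases hpre with h0 | ⟨hm, _⟩
  · subst h0; simp [PySem.List.enumerate]
  -- B's slice is the prefix of order
  rw [PySem.List.slice_to_natCast order temp_order.length]
  -- B's fold as a fold over indices j, reading order[j] with pyGetD
  rw [PySem.List.enumerate_eq_map_pyRange order (0 : Int), List.foldl_map]
  -- both sides are folds over pyRange 0 order.length 1: step functions agree pointwise
  simp only [PySem.List.len_eq]
  refine PySem.List.foldl_congr_mem _ _ _ _ ?_
  intro s i hi
  have hi' := (PySem.List.mem_pyRange_one).1 hi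
  -- names for the values A and B read at index i
  have hstep : (PySem.List.pyRange 0 (temp_order.length) 1).foldl
        (fun s j =>
          if PySem.List.pyGetD order i 0 == PySem.List.pyGetD order j 0 then
            let ri := PySem.List.pyGetD res i false
            let s1 := if ri == false && temp_res == true then (s.1 + 1, s.2) else s
            if ri == true && temp_res == false then (s1.1, s1.2 + 1) else s1
          else s) s
      = (PySem.List.pyRange 0 (temp_order.length) 1).foldl
        (fun s j =>
          if PySem.List.pyGetD order i 0 == PySem.List.pyGetD (order.take temp_order.length) j 0 then
            let ri := PySem.List.pyGetD res i false
            let s1 := if ri == false && temp_res == true then (s.1 + 1, s.2) else s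
            if ri == true && temp_res == false then (s1.1, s1.2 + 1) else s1
          else s) s := by
    refine PySem.List.foldl_congr_mem _ _ _ _ ?_
    intro s' j hj
    have hj' := (PySem.List.mem_pyRange_one).1 hj
    have hget : PySem.List.pyGetD order j 0
        = PySem.List.pyGetD (order.take temp_order.length) j 0 := by
      have h1 : (0:Int) ≤ j := by omega
      rw [PySem.List.pyGetD_eq_getElem order (i := j) 0 h1 (by omega),
          PySem.List.pyGetD_eq_getElem (order.take temp_order.length) (i := j) 0 h1
            (by rw [List.length_take]; omega)]
      simp [List.getElem_take]
    rw [hget]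
  rw [hstep]
  -- the inner loop over indices j reads exactly the elements of the prefix
  have hlen : ((order.take temp_order.length).length : Int) = (temp_order.length : Int) := by
    simp [List.length_take]; omega
  rw [← hlen,
      PySem.List.foldl_pyRange_zero_pyGetD' (order.take temp_order.length) 0
        (fun s x =>
          if PySem.List.pyGetD order i 0 == x then
            let ri := PySem.List.pyGetD res i false
            let s1 := if ri == false && temp_res == true then (s.1 + 1, s.2) else s
            if ri == true && temp_res == false then (s1.1, s1.2 + 1) else s1
          else s) s,
      pv_innerA]
  -- B's counter lookup is the prefix count
  have hcnt : ((order.take temp_order.length).foldl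
        (fun d x => d.insert x (d.getD x 0 + 1)) PySem.Dict.empty).getD
        (PySem.List.pyGetD order i 0) 0
      = ((order.take temp_order.length).count (PySem.List.pyGetD order i 0) : Int) := by
    rw [PySem.Dict.getD_foldl_insert_add_one]
    simp [PySem.Dict.getD, PySem.Dict.get?, PySem.Dict.empty]
  simp only [hcnt]
  -- compare the closed forms, case by case
  by_cases hc : (order.take temp_order.length).count (PySem.List.pyGetD order i 0) = 0
  · simp [hc]
  · have hc' : ((order.take temp_order.length).count (PySem.List.pyGetD order i 0) : Int) ≠ 0 := by
      exact_mod_cast hc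
    cases htr : temp_res <;> cases hri : PySem.List.pyGetD res i false <;>
      simp [hc', Prod.ext_iff] <;> ring
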